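-- pv_equiv track=rewrite | github.com/MJJBennett/dotfiles | applets/last_edited.py | parsed
-- ===== SOURCE A (Python) =====
-- def consume(a):
--     if len(a) == 0:
--         a = [None]
--     return (a[0], a[1:])
--
-- def parsed(args):
--     params = list()
--     norm = list()
--     skip = False
--     while len(args) > 0:
--         arg, args = consume(args)
--         if skip or not arg.startswith('--'):
--             norm.append(arg)
--             continue
--         if arg == '--':
--             skip = True
--             continue
--         params.append(arg.strip('-'))
--     return (params, norm)
-- ===== SOURCE B (Python) =====
-- def parsed(args):
--     sep = None
--     for i, a in enumerate(args):
--         if a == '--':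
--             sep = i
--             break
--     before = args if sep is None else args[:sep]
--     after = [] if sep is None else args[sep + 1:]
--     params = [a.strip('-') for a in before if a.startswith('--')]
--     norm = [a for a in before if not a.startswith('--')] + after
--     return (params, norm)
-- ===== Notes on version B (the rewrite author's own statement) =====
-- stated objective: simpler
-- what changed: B splits the list at the first '--' separator and classifies the 'before' segment with two comprehensions, instead of front-popping with consume() (which re-copies the tail each iteration) while threading a skip flag through one stateful loop.
import Mathlib
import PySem

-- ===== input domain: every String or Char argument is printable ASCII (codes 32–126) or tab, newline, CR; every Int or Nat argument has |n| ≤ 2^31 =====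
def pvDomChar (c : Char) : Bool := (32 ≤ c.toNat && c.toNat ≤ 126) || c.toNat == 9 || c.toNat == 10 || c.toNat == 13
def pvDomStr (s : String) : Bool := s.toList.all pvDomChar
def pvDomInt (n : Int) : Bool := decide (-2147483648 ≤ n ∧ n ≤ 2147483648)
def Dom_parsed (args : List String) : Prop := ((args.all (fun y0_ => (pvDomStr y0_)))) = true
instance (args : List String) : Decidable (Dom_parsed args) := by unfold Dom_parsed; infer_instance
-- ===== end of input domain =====

-- B splits the list at the first '--' separator and classifies segments with filters/maps,
-- instead of A's front-popping loop (args = a[1:] re-copies the tail each step); simpler and faster.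


-- ===== PORT A =====
-- consume(a): returns (a[0], a[1:]); the None-padding branch is unreachable inside
-- parsed's loop (len(args) > 0 there), so the head is taken directly.
def parsedLoop (args : List String) (params norm : List String) (skip : Bool) :
    List String × List String :=
  match args with
  | [] => (params, norm)
  | arg :: rest =>
    if skip || !(PySem.Str.startswith arg "--") then
      parsedLoop rest params (norm ++ [arg]) skip
    else if arg == "--" then
      parsedLoop rest params norm true
    else
      parsedLoop rest (params ++ [PySem.Str.stripChars arg "-"]) norm skip

def parsed (args : List String) : List String × List String :=
  parsedLoop args [] [] false

-- ===== PORT B =====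
-- index of the first token exactly equal to '--' (Source B's enumerate loop)
def findSep (args : List String) : Option Nat :=
  match args with
  | [] => none
  | a :: rest => if a == "--" then some 0 else (findSep rest).map (· + 1)

def parsed_alt (args : List String) : List String × List String :=
  let pre :=
    match findSep args with
    | none => (args, ([] : List String))
    | some i => (args.take i, args.drop (i + 1))
  let params := (pre.1.filter (fun a => PySem.Str.startswith a "--")).map
      (fun a => PySem.Str.stripChars a "-")
  let norm := (pre.1.filter (fun a => !PySem.Str.startswith a "--")) ++ pre.2
  (params, norm)

-- ===== PRECONDITION & SPEC =====
def Spec_parsed (args : List String) (out : List String × List String) : Prop := out = parsed_alt args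
instance (args : List String) (out : List String × List String) : Decidable (Spec_parsed args out) := by unfold Spec_parsed; infer_instance

-- ===== CLAIM (what is proved, stated in full; the proofs are below) =====
def Claim_equal_parsed : Prop := ∀ (args : List String), Dom_parsed args → Spec_parsed args (parsed args)

-- ===== LEMMAS AND PROOFS =====

-- once skip is set, everything remaining is appended to norm
theorem parsedLoop_skip (args params norm : List String) :
    parsedLoop args params norm true = (params, norm ++ args) := by
  induction args generalizing norm with
  | nil => simp [parsedLoop]
  | cons a rest ih => simp [parsedLoop, ih]

theorem parsedLoop_eq (args params norm : List String) :
    parsedLoop args params norm false =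
      (params ++ (parsed_alt args).1, norm ++ (parsed_alt args).2) := by
  induction args generalizing params norm with
  | nil => simp [parsedLoop, parsed_alt, findSep]
  | cons a rest ih =>
    by_cases hsep : a = "--"
    · subst hsep
      simp [parsedLoop, parsed_alt, findSep, PySem.Str.startswith,
        PySem.Chars.startswith, parsedLoop_skip]
    · have hfind : findSep (a :: rest) = (findSep rest).map (· + 1) := by
        simp [findSep, hsep]
      by_cases hsw : PySem.Chars.startswith a.toList ['-', '-'] = true
      · rw [show parsedLoop (a :: rest) params norm false =
            parsedLoop rest (params ++ [PySem.Str.stripChars a "-"]) norm false by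
            simp [parsedLoop, hsw, hsep, PySem.Str.startswith]]
        rw [ih]
        cases hf : findSep rest with
        | none => simp [parsed_alt, hfind, hf, hsw]
        | some i => simp [parsed_alt, hfind, hf, hsw]
      · rw [show parsedLoop (a :: rest) params norm false =
            parsedLoop rest params (norm ++ [a]) false by
            simp [parsedLoop, PySem.Str.startswith, hsw]]
        rw [ih]
        cases hf : findSep rest with
        | none => simp [parsed_alt, hfind, hf, hsw]
        | some i => simp [parsed_alt, hfind, hf, hsw]

-- ===== VERDICT (by name: the statement is the Claim_ definition above) =====
theorem parsed_spec : Claim_equal_parsed := by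
  intro args _
  unfold Spec_parsed parsed
  rw [parsedLoop_eq]
  simp
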